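-- pv_equiv track=rewrite | github.com/aasthaagrawal/Algorithms_and_Data_Structures | leetcode/816_Ambiguous_Coordinates.py | getAllNums
-- ===== SOURCE A (Python) =====
-- def getAllNums(numstring):
--     l = len(numstring)
--     if l==1:
--         return [numstring]
--     if numstring[0]=='0':
--         if numstring[-1]=='0':
--             return []
--         return [numstring[0]+"."+numstring[1:]]
--     if numstring[-1]=='0':
--         return [numstring]
--     res = [numstring]
--     for i in range(1,l):
--         res.append(numstring[:i]+"."+numstring[i:])
--     return res
-- ===== SOURCE B (Python) =====
-- def getAllNums(numstring):
--     # predicate-driven split enumeration instead of A's early-return case ladder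
--     def ok(s):
--         return len(s) == 1 or s[0] != '0'
--     res = [numstring] if ok(numstring) else []
--     for i in range(1, len(numstring)):
--         left, right = numstring[:i], numstring[i:]
--         if ok(left) and right[-1] != '0':
--             res.append(left + "." + right)
--     return res
-- ===== Notes on version B (the rewrite author's own statement) =====
-- stated objective: idiomatic
-- what changed: A's four-way early-return case ladder is replaced by a single uniform loop over all split positions filtered by one leading-zero/trailing-zero predicate.
import Mathlib
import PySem

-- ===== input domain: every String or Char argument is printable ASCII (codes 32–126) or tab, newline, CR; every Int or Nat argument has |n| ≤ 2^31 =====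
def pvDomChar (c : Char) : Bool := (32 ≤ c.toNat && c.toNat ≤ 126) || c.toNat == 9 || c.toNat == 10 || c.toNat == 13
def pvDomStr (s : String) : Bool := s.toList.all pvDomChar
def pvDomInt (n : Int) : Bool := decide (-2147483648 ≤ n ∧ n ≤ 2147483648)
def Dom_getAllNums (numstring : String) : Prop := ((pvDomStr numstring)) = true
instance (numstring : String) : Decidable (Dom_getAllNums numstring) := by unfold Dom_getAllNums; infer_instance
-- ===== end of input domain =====

-- B replaces A's early-return case ladder by one predicate-driven loop over all split positions; same return value on nonempty strings.

-- ===== PORT A =====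
def getAllNums (numstring : String) : List String :=
  let cs := numstring.toList
  let l : Int := (cs.length : Int)
  if l == 1 then [numstring]
  else if PySem.List.pyGet? cs 0 == some '0' then
    if PySem.List.pyGet? cs (-1) == some '0' then []
    else [String.ofList ((PySem.List.pyGet? cs 0).elim [] (fun c => [c]) ++ ['.'] ++ PySem.List.slice cs (some 1) none)]
  else if PySem.List.pyGet? cs (-1) == some '0' then [numstring]
  else
    (PySem.List.pyRange 1 l 1).foldl
      (fun res i => res ++ [String.ofList (PySem.List.slice cs none (some i) ++ ['.'] ++ PySem.List.slice cs (some i) none)])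
      [numstring]

-- ===== PORT B =====
-- ok(s) = len(s) == 1 or s[0] != '0'
def okAlt (cs : List Char) : Bool :=
  (cs.length : Int) == 1 || !(PySem.List.pyGet? cs 0 == some '0')

def getAllNums_alt (numstring : String) : List String :=
  let cs := numstring.toList
  (PySem.List.pyRange 1 (cs.length : Int) 1).foldl
    (fun res i =>
      let left := PySem.List.slice cs none (some i)
      let right := PySem.List.slice cs (some i) none
      if okAlt left && !(PySem.List.pyGet? right (-1) == some '0')
      then res ++ [String.ofList (left ++ ['.'] ++ right)]
      else res)
    (if okAlt cs then [numstring] else [])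

-- ===== PRECONDITION & SPEC =====
-- A (and B's predicate) indexes numstring[0], so both raise IndexError on the empty string; Pre_ excludes only that input.
def Pre_getAllNums (numstring : String) : Prop := numstring ≠ ""
instance (numstring : String) : Decidable (Pre_getAllNums numstring) := by unfold Pre_getAllNums; infer_instance
def pvWitness_getAllNums : String := "120"

def Spec_getAllNums (numstring : String) (out : List String) : Prop := out = getAllNums_alt numstring
instance (numstring : String) (out : List String) : Decidable (Spec_getAllNums numstring out) := by unfold Spec_getAllNums; infer_instance

-- ===== CLAIM (what is proved, stated in full; the proofs are below) =====
def Claim_equal_getAllNums : Prop := ∀ (numstring : String), Dom_getAllNums numstring → Pre_getAllNums numstring → Spec_getAllNums numstring (getAllNums numstring)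

-- ===== LEMMAS AND PROOFS =====

lemma foldl_if_false {α β : Type} (L : List α) (p : α → Bool) (f : β → α → β) (init : β)
    (h : ∀ x ∈ L, p x = false) :
    L.foldl (fun acc x => if p x then f acc x else acc) init = init := by
  induction L generalizing init with
  | nil => rfl
  | cons x L ih =>
    simp only [List.foldl_cons, h x (by simp)]
    exact ih init (fun y hy => h y (by simp [hy]))

lemma okAlt_one (c : Char) : okAlt [c] = true := by simp [okAlt]

lemma okAlt_big (c d : Char) (t : List Char) : okAlt (c :: d :: t) = !(c == '0') := by
  simp [okAlt, pysem]
  omega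

lemma pyGet?_last_drop (cs : List Char) (k : Nat) (h : k < cs.length) :
    PySem.List.pyGet? (cs.drop k) (-1) = cs.getLast? := by
  rw [PySem.List.pyGet?_neg_one, List.getLast?_drop]
  simp [Nat.not_le.mpr h]

-- the loop condition of B, evaluated for a split position 1 ≤ i < len
lemma condB_eval (c d : Char) (t : List Char) (i : Int) (h1 : 1 ≤ i) (h2 : i < ((c :: d :: t).length : Int)) :
    (okAlt (PySem.List.slice (c :: d :: t) none (some i)) &&
      !(PySem.List.pyGet? (PySem.List.slice (c :: d :: t) (some i) none) (-1) == some '0'))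
    = ((i == 1 || !(c == '0')) && !((d :: t).getLast? == some '0')) := by
  have h0 : (0:Int) ≤ i := by omega
  rw [PySem.List.slice_to _ h0, PySem.List.slice_from _ h0]
  have hlen : i.toNat < (c :: d :: t).length := by simp at h2 ⊢; omega
  rw [pyGet?_last_drop _ _ hlen, List.getLast?_cons_cons]
  obtain ⟨k, hk1⟩ : ∃ k : Nat, i.toNat = k + 1 := ⟨i.toNat - 1, by omega⟩
  have hk2 : i = ((k + 1 : Nat) : Int) := by omega
  rw [hk1, List.take_succ_cons]
  congr 1
  cases k with
  | zero => simp [okAlt_one, hk2]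
  | succ k' =>
    rw [List.take_succ_cons, okAlt_big]
    simp [hk2]
    omega

theorem getAllNums_main (ns : String) (hpre : ns ≠ "") : getAllNums ns = getAllNums_alt ns := by
  have hne : ns.toList ≠ [] := by simp [hpre]
  unfold getAllNums getAllNums_alt
  cases hcs : ns.toList with
  | nil => exact absurd hcs hne
  | cons c rest =>
    cases rest with
    | nil =>
      simp [okAlt_one, PySem.List.pyRange_one_eq_nil (by omega : (1:Int) ≤ 1)]
    | cons d t =>
      have hl1 : (((c :: d :: t).length : Int) == 1) = false := by simp; omega
      have hget0 : PySem.List.pyGet? (c :: d :: t) 0 = some c := by simp [pysem]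
      have hgetm1 : PySem.List.pyGet? (c :: d :: t) (-1) = (d :: t).getLast? := by
        rw [PySem.List.pyGet?_neg_one, List.getLast?_cons_cons]
      obtain ⟨z, hz⟩ : ∃ z, (d :: t).getLast? = some z := by
        cases hzz : (d :: t).getLast? with
        | none => simp at hzz
        | some z => exact ⟨z, rfl⟩
      simp only [hl1, hget0, hgetm1, hz, if_false, Bool.false_eq_true]
      by_cases hc : c = '0'
      · subst hc
        by_cases hz0 : z = '0'
        · -- leading and trailing zero: both return []
          subst hz0
          simp only [beq_self_eq_true, if_true]
          rw [show okAlt ('0' :: d :: t) = false by simp [okAlt_big], if_neg (by simp)]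
          rw [foldl_if_false]
          intro i hi
          rw [PySem.List.mem_pyRange_one] at hi
          rw [condB_eval '0' d t i hi.1 hi.2]
          simp [hz]
        · -- leading zero only: single dotted form at i = 1
          simp only [beq_self_eq_true, if_true]
          rw [if_neg (by simp [hz0])]
          rw [show okAlt ('0' :: d :: t) = false by simp [okAlt_big], if_neg (by simp)]
          rw [PySem.List.pyRange_one_cons (by simp), List.foldl_cons]
          rw [if_pos]
          · rw [foldl_if_false]
            · simp [PySem.List.slice_to, PySem.List.slice_from]
            · intro i hi
              rw [PySem.List.mem_pyRange_one] at hi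
              rw [condB_eval '0' d t i (by omega) hi.2]
              have h1 : (i == 1) = false := by simp; omega
              simp [h1]
          · rw [condB_eval '0' d t 1 (by omega) (by simp)]
            simp [hz, hz0]
      · have hcb : (some c == some '0') = false := by simp [hc]
        have hok : okAlt (c :: d :: t) = true := by simp [okAlt_big, hc]
        simp only [hcb, if_false, Bool.false_eq_true, hok, if_true]
        by_cases hz0 : z = '0'
        · -- trailing zero: just the plain string
          subst hz0
          simp only [beq_self_eq_true, if_true]
          rw [foldl_if_false]
          intro i hi
          rw [PySem.List.mem_pyRange_one] at hi
          rw [condB_eval c d t i hi.1 hi.2]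
          simp [hz]
        · -- no leading/trailing zero: every split is kept
          rw [if_neg (by simp [hz0])]
          apply PySem.List.foldl_congr_mem
          intro acc i hi
          rw [PySem.List.mem_pyRange_one] at hi
          rw [condB_eval c d t i hi.1 hi.2]
          simp [hc, hz, hz0]

-- ===== VERDICT (by name: the statement is the Claim_ definition above) =====
theorem getAllNums_spec : Claim_equal_getAllNums := by
  intro ns _ hpre
  exact (getAllNums_main ns hpre).symm ▸ rfl
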